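-- pv_equiv track=rewrite | github.com/aleix-quirante/nexus-graph-ai | core/schema_map.py | get_standard_label
-- ===== SOURCE A (Python) =====
-- SCHEMA_MAP = {
--     "labels": {
--         "EMPRESA": ["e", "PROVEEDOR", "CLIENTE", "SOCIEDAD"],
--         "PEDIDO": ["p", "ORDEN", "ENCARGO", "PRODUCTO"],
--         "RIESGO": ["r", "PROBLEMA", "ALERTA", "RETRASO"],
--         "EMPLEADO": ["persona", "COMERCIAL", "RESPONSABLE"],
--     },
--     "relationships": {
--         "REALIZA_PEDIDO": ["HACE_PEDIDO", "TIENE_PEDIDO", "COMPRA", "SOLICITA"],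
--         "ATIENDE_PEDIDO": ["TIENE_PRECIO", "SUMINISTRA", "PROVEE"],
--         "TIENE_RIESGO": ["CONTIENE_RIESGO", "RIESGO_DETECTADO"],
--         "ASIGNADO_A": ["LLEVA_CUENTA", "RESPONSABLE_DE"],
--     },
--     "properties": {
--         "id": ["nombre", "name", "identificador", "entidad"],
--         "monto": ["precio", "presupuesto", "coste", "valor"],
--         "descripcion": ["nota", "detalle", "observacion"],
--     },
-- }
--
-- def get_standard_label(raw_label: str) -> str:
--     """
--     Devuelve la clave estándar del diccionario si el raw_label está en su lista de valores.
--     """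
--     if not raw_label:
--         return ""
--
--     raw_upper = raw_label.upper()
--
--     for standard_key, aliases in SCHEMA_MAP["labels"].items():
--         if raw_upper == standard_key:
--             return standard_key
--         if raw_upper in [alias.upper() for alias in aliases]:
--             return standard_key
--
--     return raw_upper
-- ===== SOURCE B (Python) =====
-- SCHEMA_MAP = {
--     "labels": {
--         "EMPRESA": ["e", "PROVEEDOR", "CLIENTE", "SOCIEDAD"],
--         "PEDIDO": ["p", "ORDEN", "ENCARGO", "PRODUCTO"],
--         "RIESGO": ["r", "PROBLEMA", "ALERTA", "RETRASO"],
--         "EMPLEADO": ["persona", "COMERCIAL", "RESPONSABLE"],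
--     },
--     "relationships": {
--         "REALIZA_PEDIDO": ["HACE_PEDIDO", "TIENE_PEDIDO", "COMPRA", "SOLICITA"],
--         "ATIENDE_PEDIDO": ["TIENE_PRECIO", "SUMINISTRA", "PROVEE"],
--         "TIENE_RIESGO": ["CONTIENE_RIESGO", "RIESGO_DETECTADO"],
--         "ASIGNADO_A": ["LLEVA_CUENTA", "RESPONSABLE_DE"],
--     },
--     "properties": {
--         "id": ["nombre", "name", "identificador", "entidad"],
--         "monto": ["precio", "presupuesto", "coste", "valor"],
--         "descripcion": ["nota", "detalle", "observacion"],
--     },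
-- }
--
-- # Flat index built once: each standard key maps to itself, each uppercased alias
-- # maps to its standard key (no collisions exist in SCHEMA_MAP["labels"]).
-- _FLAT = {}
-- for _k in SCHEMA_MAP["labels"]:
--     _FLAT[_k] = _k
-- for _k, _aliases in SCHEMA_MAP["labels"].items():
--     for _a in _aliases:
--         _FLAT[_a.upper()] = _k
--
-- def get_standard_label(raw_label: str) -> str:
--     if not raw_label:
--         return ""
--     u = raw_label.upper()
--     return _FLAT.get(u, u)
-- ===== Notes on version B (the rewrite author's own statement) =====
-- stated objective: simpler
-- what changed: Replaces the per-call loop over alias groups with a module-level flat dict built once (key->key, alias.upper()->key), so the function body is a single hash lookup with the uppercased input as default.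
import Mathlib
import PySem

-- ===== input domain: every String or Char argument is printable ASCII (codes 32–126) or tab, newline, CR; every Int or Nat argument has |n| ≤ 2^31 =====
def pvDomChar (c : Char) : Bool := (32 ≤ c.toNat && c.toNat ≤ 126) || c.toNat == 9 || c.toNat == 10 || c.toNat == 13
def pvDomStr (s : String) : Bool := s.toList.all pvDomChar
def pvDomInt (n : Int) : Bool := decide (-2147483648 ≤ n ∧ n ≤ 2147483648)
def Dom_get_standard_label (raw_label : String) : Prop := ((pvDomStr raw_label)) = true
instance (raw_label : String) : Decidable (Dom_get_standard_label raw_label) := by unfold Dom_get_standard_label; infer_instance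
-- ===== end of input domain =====

-- B replaces A's per-call scan over alias groups by a flat dict built once; objective: simpler.

-- SCHEMA_MAP["labels"] (insertion order), shared module constant
def schemaLabels : List (String × List String) :=
  [("EMPRESA", ["e", "PROVEEDOR", "CLIENTE", "SOCIEDAD"]),
   ("PEDIDO", ["p", "ORDEN", "ENCARGO", "PRODUCTO"]),
   ("RIESGO", ["r", "PROBLEMA", "ALERTA", "RETRASO"]),
   ("EMPLEADO", ["persona", "COMERCIAL", "RESPONSABLE"])]

-- ===== PORT A =====
-- A's for-loop over SCHEMA_MAP["labels"].items()
def pyLoopA (raw_upper : String) : List (String × List String) → String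
  | [] => raw_upper
  | (standard_key, aliases) :: rest =>
    if raw_upper = standard_key then standard_key
    else if raw_upper ∈ aliases.map PySem.Str.upper then standard_key
    else pyLoopA raw_upper rest

def get_standard_label (raw_label : String) : String :=
  if raw_label = "" then ""
  else
    let raw_upper := PySem.Str.upper raw_label
    pyLoopA raw_upper schemaLabels

-- ===== PORT B =====
-- the module-level flat table: key -> key, then alias.upper() -> key
def FLAT : PySem.Dict String String :=
  let d := schemaLabels.foldl (fun d kv => d.insert kv.1 kv.1) PySem.Dict.empty
  schemaLabels.foldl (fun d kv => kv.2.foldl (fun d a => d.insert (PySem.Str.upper a) kv.1) d) d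

def get_standard_label_alt (raw_label : String) : String :=
  if raw_label = "" then ""
  else
    let u := PySem.Str.upper raw_label
    FLAT.getD u u

-- ===== PRECONDITION & SPEC =====
def Spec_get_standard_label (raw_label : String) (out : String) : Prop := out = get_standard_label_alt raw_label
instance (raw_label : String) (out : String) : Decidable (Spec_get_standard_label raw_label out) := by unfold Spec_get_standard_label; infer_instance

-- ===== CLAIM (what is proved, stated in full; the proofs are below) =====
def Claim_equal_get_standard_label : Prop := ∀ (raw_label : String), Dom_get_standard_label raw_label → Spec_get_standard_label raw_label (get_standard_label raw_label)

-- ===== LEMMAS AND PROOFS =====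

-- the two lookups agree for EVERY uppercased string u
theorem core_eq (u : String) : pyLoopA u schemaLabels = FLAT.getD u u := by
  have ua0 : PySem.Str.upper "e" = "E" := by decide
  have ua1 : PySem.Str.upper "PROVEEDOR" = "PROVEEDOR" := by decide
  have ua2 : PySem.Str.upper "CLIENTE" = "CLIENTE" := by decide
  have ua3 : PySem.Str.upper "SOCIEDAD" = "SOCIEDAD" := by decide
  have ua4 : PySem.Str.upper "p" = "P" := by decide
  have ua5 : PySem.Str.upper "ORDEN" = "ORDEN" := by decide
  have ua6 : PySem.Str.upper "ENCARGO" = "ENCARGO" := by decide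
  have ua7 : PySem.Str.upper "PRODUCTO" = "PRODUCTO" := by decide
  have ua8 : PySem.Str.upper "r" = "R" := by decide
  have ua9 : PySem.Str.upper "PROBLEMA" = "PROBLEMA" := by decide
  have ua10 : PySem.Str.upper "ALERTA" = "ALERTA" := by decide
  have ua11 : PySem.Str.upper "RETRASO" = "RETRASO" := by decide
  have ua12 : PySem.Str.upper "persona" = "PERSONA" := by decide
  have ua13 : PySem.Str.upper "COMERCIAL" = "COMERCIAL" := by decide
  have ua14 : PySem.Str.upper "RESPONSABLE" = "RESPONSABLE" := by decide
  by_cases h0 : u = "EMPRESA"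
  · subst h0; decide
  by_cases h1 : u = "PEDIDO"
  · subst h1; decide
  by_cases h2 : u = "RIESGO"
  · subst h2; decide
  by_cases h3 : u = "EMPLEADO"
  · subst h3; decide
  by_cases h4 : u = "E"
  · subst h4; decide
  by_cases h5 : u = "PROVEEDOR"
  · subst h5; decide
  by_cases h6 : u = "CLIENTE"
  · subst h6; decide
  by_cases h7 : u = "SOCIEDAD"
  · subst h7; decide
  by_cases h8 : u = "P"
  · subst h8; decide
  by_cases h9 : u = "ORDEN"
  · subst h9; decide
  by_cases h10 : u = "ENCARGO"
  · subst h10; decide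
  by_cases h11 : u = "PRODUCTO"
  · subst h11; decide
  by_cases h12 : u = "R"
  · subst h12; decide
  by_cases h13 : u = "PROBLEMA"
  · subst h13; decide
  by_cases h14 : u = "ALERTA"
  · subst h14; decide
  by_cases h15 : u = "RETRASO"
  · subst h15; decide
  by_cases h16 : u = "PERSONA"
  · subst h16; decide
  by_cases h17 : u = "COMERCIAL"
  · subst h17; decide
  by_cases h18 : u = "RESPONSABLE"
  · subst h18; decide
  simp [pyLoopA, schemaLabels, FLAT, PySem.Dict.getD_eq_get?_getD, PySem.Dict.get?_insert, PySem.Dict.get?_empty, ua0, ua1, ua2, ua3, ua4, ua5, ua6, ua7, ua8, ua9, ua10, ua11, ua12, ua13, ua14, h0, h1, h2, h3, h4, h5, h6, h7, h8, h9, h10, h11, h12, h13, h14, h15, h16, h17, h18]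

-- ===== VERDICT (by name: the statement is the Claim_ definition above) =====
theorem get_standard_label_spec : Claim_equal_get_standard_label := by
  intro raw_label _
  unfold Spec_get_standard_label get_standard_label get_standard_label_alt
  by_cases h : raw_label = ""
  · simp [h]
  · simp only [h, if_false]
    exact core_eq (PySem.Str.upper raw_label)
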